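-- pv_equiv track=rewrite | github.com/Verificacion-y-Control-UVA-SC/Operaciones-VyC | Scanner ULTA/Configuracion.py | buscar_producto_por_upc
-- ===== SOURCE A (Python) =====
-- def buscar_producto_por_upc(upc_or_categoria, productos):
--     """Busca un producto por su UPC o por CATEGORIA.
--
--     Comportamiento:
--     - Si se encuentra una coincidencia exacta por UPC, devuelve ese producto.
--     - Si no hay coincidencia por UPC, busca por CATEGORIA (coincidencia exacta
--       ignorando mayúsculas). Si hay varias coincidencias se devuelve la primera.
--     - Devuelve None si no encuentra nada.
--     """
--     if not productos or not upc_or_categoria: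
--         return None
--
--     termino = str(upc_or_categoria).strip()
--     # Primero intentar buscar por UPC (igual que antes)
--     for p in productos:
--         upc_val = p.get("UPC") or p.get("upc") or next((p[k] for k in p if "UPC" in k.upper()), None)
--         if upc_val and str(upc_val).strip() == termino:
--             return p
--
--     # Si no se encontró por UPC, intentar buscar por categoría
--     termino_upper = termino.upper()
--     for p in productos:
--         cat = p.get("CATEGORIA") or p.get("categoria") or p.get("Categoria")
--         if cat and str(cat).strip().upper() == termino_upper:
--             return p
--
--     # Como último recurso, buscar por inclusión parcial en la categoría
--     for p in productos:
--         cat = p.get("CATEGORIA") or p.get("categoria") or p.get("Categoria")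
--         if cat and termino_upper in str(cat).strip().upper():
--             return p
--
--     return None
-- ===== SOURCE B (Python) =====
-- def buscar_producto_por_upc(upc_or_categoria, productos):
--     """Single pass: return first UPC match immediately; meanwhile remember the
--     first exact-category and first partial-category candidates, used after."""
--     if not productos or not upc_or_categoria:
--         return None
--
--     termino = str(upc_or_categoria).strip()
--     termino_upper = termino.upper()
--     exacto = None
--     parcial = None
--     for p in productos:
--         upc_val = p.get("UPC") or p.get("upc") or next((p[k] for k in p if "UPC" in k.upper()), None)
--         if upc_val and str(upc_val).strip() == termino:
--             return p
--         cat = p.get("CATEGORIA") or p.get("categoria") or p.get("Categoria")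
--         if cat:
--             c = str(cat).strip().upper()
--             if exacto is None and c == termino_upper:
--                 exacto = p
--             if parcial is None and termino_upper in c:
--                 parcial = p
--     return exacto if exacto is not None else parcial
-- ===== Notes on version B (the rewrite author's own statement) =====
-- stated objective: simpler
-- what changed: Collapses A's three scans over productos into one pass that returns on the first UPC match and records the first exact-category and first partial-category candidates in two slots, picked after the loop.
import Mathlib
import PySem

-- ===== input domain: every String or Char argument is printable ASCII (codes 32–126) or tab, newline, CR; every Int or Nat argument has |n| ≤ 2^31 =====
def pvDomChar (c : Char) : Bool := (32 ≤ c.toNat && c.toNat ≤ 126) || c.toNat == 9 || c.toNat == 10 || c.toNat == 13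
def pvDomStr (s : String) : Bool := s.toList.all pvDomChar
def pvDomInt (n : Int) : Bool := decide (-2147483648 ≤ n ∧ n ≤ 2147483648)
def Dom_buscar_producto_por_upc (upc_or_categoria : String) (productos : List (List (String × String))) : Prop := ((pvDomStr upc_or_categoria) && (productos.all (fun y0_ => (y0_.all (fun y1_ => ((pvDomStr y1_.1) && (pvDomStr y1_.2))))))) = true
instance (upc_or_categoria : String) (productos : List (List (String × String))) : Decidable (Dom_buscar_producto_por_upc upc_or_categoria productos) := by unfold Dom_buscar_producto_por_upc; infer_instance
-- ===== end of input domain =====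

-- B collapses A's three scans over productos into a single pass with two candidate slots (objective: simpler).

-- shared extraction helpers (the same Python expressions occur verbatim in A and B)
-- Python 'a or b' on a None-or-str value: truthy iff non-None and non-empty
def pyOrS (a b : Option String) : Option String :=
  if (match a with | some s => s != "" | none => false) then a else b

-- p.get("UPC") or p.get("upc") or next((p[k] for k in p if "UPC" in k.upper()), None)
def upcVal (p : List (String × String)) : Option String :=
  let d := PySem.Dict.ofList p
  pyOrS (pyOrS (d.get? "UPC") (d.get? "upc"))
    ((d.items.find? (fun kv => PySem.Str.isIn "UPC" (PySem.Str.upper kv.1))).map (·.2))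

-- p.get("CATEGORIA") or p.get("categoria") or p.get("Categoria")
def catVal (p : List (String × String)) : Option String :=
  let d := PySem.Dict.ofList p
  pyOrS (pyOrS (d.get? "CATEGORIA") (d.get? "categoria")) (d.get? "Categoria")

-- 'if upc_val and str(upc_val).strip() == termino'
def predU (termino : String) (p : List (String × String)) : Bool :=
  match upcVal p with
  | some s => s != "" && (PySem.Str.strip s == termino)
  | none => false

-- 'if cat and str(cat).strip().upper() == termino_upper'
def predE (tu : String) (p : List (String × String)) : Bool :=
  match catVal p with
  | some s => s != "" && (PySem.Str.upper (PySem.Str.strip s) == tu)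
  | none => false

-- 'if cat and termino_upper in str(cat).strip().upper()'
def predP (tu : String) (p : List (String × String)) : Bool :=
  match catVal p with
  | some s => s != "" && PySem.Str.isIn tu (PySem.Str.upper (PySem.Str.strip s))
  | none => false

-- ===== PORT A =====
def buscar_producto_por_upc (upc_or_categoria : String) (productos : List (List (String × String))) : Option (List (String × String)) :=
  if productos = [] || upc_or_categoria = "" then none
  else
    let termino := PySem.Str.strip upc_or_categoria
    match productos.find? (predU termino) with
    | some p => some p
    | none =>
      let termino_upper := PySem.Str.upper termino
      match productos.find? (predE termino_upper) with
      | some p => some p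
      | none =>
        match productos.find? (predP termino_upper) with
        | some p => some p
        | none => none

-- ===== PORT B =====
-- the single pass of Source B: early return on UPC match, two candidate accumulators
def altLoop (termino tu : String) (l : List (List (String × String))) (exacto parcial : Option (List (String × String))) : Option (List (String × String)) :=
  match l with
  | [] => if exacto.isSome then exacto else parcial
  | p :: rest =>
    if predU termino p then some p
    else
      match catVal p with
      | some s =>
        if s != "" then
          let c := PySem.Str.upper (PySem.Str.strip s)
          let exacto' := if exacto = none && c == tu then some p else exacto
          let parcial' := if parcial = none && PySem.Str.isIn tu c then some p else parcial
          altLoop termino tu rest exacto' parcial'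
        else altLoop termino tu rest exacto parcial
      | none => altLoop termino tu rest exacto parcial

def buscar_producto_por_upc_alt (upc_or_categoria : String) (productos : List (List (String × String))) : Option (List (String × String)) :=
  if productos = [] || upc_or_categoria = "" then none
  else
    let termino := PySem.Str.strip upc_or_categoria
    let termino_upper := PySem.Str.upper termino
    altLoop termino termino_upper productos none none

-- ===== PRECONDITION & SPEC =====
def Spec_buscar_producto_por_upc (upc_or_categoria : String) (productos : List (List (String × String))) (out : Option (List (String × String))) : Prop := out = buscar_producto_por_upc_alt upc_or_categoria productos
instance (upc_or_categoria : String) (productos : List (List (String × String))) (out : Option (List (String × String))) : Decidable (Spec_buscar_producto_por_upc upc_or_categoria productos out) := by unfold Spec_buscar_producto_por_upc; infer_instance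

-- ===== CLAIM (what is proved, stated in full; the proofs are below) =====
def Claim_equal_buscar_producto_por_upc : Prop := ∀ (upc_or_categoria : String) (productos : List (List (String × String))), Dom_buscar_producto_por_upc upc_or_categoria productos → Spec_buscar_producto_por_upc upc_or_categoria productos (buscar_producto_por_upc upc_or_categoria productos)

-- ===== LEMMAS AND PROOFS =====

-- invariant of B's single pass: first UPC hit wins, otherwise the slots absorb the first exact / partial category hits
theorem altLoop_eq (termino tu : String) (l : List (List (String × String))) (exacto parcial : Option (List (String × String))) :
    altLoop termino tu l exacto parcial =
      match l.find? (predU termino) with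
      | some p => some p
      | none =>
        let ex := match exacto with | some _ => exacto | none => l.find? (predE tu)
        let pa := match parcial with | some _ => parcial | none => l.find? (predP tu)
        if ex.isSome then ex else pa := by
  induction l generalizing exacto parcial with
  | nil => cases exacto <;> cases parcial <;> rfl
  | cons p rest ih =>
    by_cases hU : predU termino p = true
    · rw [List.find?_cons_of_pos hU]
      simp [altLoop, hU]
    · have hU0 : predU termino p = false := by simpa using hU
      rw [List.find?_cons_of_neg (by simp [hU0])]
      cases hc : catVal p with
      | none =>
        have e0 : predE tu p = false := by simp [predE, hc]
        have p0 : predP tu p = false := by simp [predP, hc]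
        rw [List.find?_cons_of_neg (by simp [e0]), List.find?_cons_of_neg (by simp [p0])]
        simpa [altLoop, hU0, hc] using ih exacto parcial
      | some s =>
        by_cases hs : s = ""
        · have e0 : predE tu p = false := by simp [predE, hc, hs]
          have p0 : predP tu p = false := by simp [predP, hc, hs]
          rw [List.find?_cons_of_neg (by simp [e0]), List.find?_cons_of_neg (by simp [p0])]
          simpa [altLoop, hU0, hc, hs] using ih exacto parcial
        · have hs' : (s != "") = true := by simpa using hs
          have e1 : predE tu p = (PySem.Str.upper (PySem.Str.strip s) == tu) := by
            simp [predE, hc, hs']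
          have p1 : predP tu p = PySem.Str.isIn tu (PySem.Str.upper (PySem.Str.strip s)) := by
            simp [predP, hc, hs']
          have hstep : altLoop termino tu (p :: rest) exacto parcial =
              altLoop termino tu rest
                (if exacto = none && (PySem.Str.upper (PySem.Str.strip s) == tu) then some p else exacto)
                (if parcial = none && PySem.Str.isIn tu (PySem.Str.upper (PySem.Str.strip s)) then some p else parcial) := by
            simp [altLoop, hU0, hc, hs']
          rw [hstep, ih]
          by_cases h1 : (PySem.Str.upper (PySem.Str.strip s) == tu) = true
          · have fE : List.find? (predE tu) (p :: rest) = some p :=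
              List.find?_cons_of_pos (by rw [e1]; exact h1)
            by_cases h2 : PySem.Str.isIn tu (PySem.Str.upper (PySem.Str.strip s)) = true
            · have fP : List.find? (predP tu) (p :: rest) = some p :=
                List.find?_cons_of_pos (by rw [p1]; exact h2)
              cases hF : List.find? (predU termino) rest <;>
                cases exacto <;> cases parcial <;> simp [hF, fE, fP, h1, h2]
            · have fP : List.find? (predP tu) (p :: rest) = List.find? (predP tu) rest :=
                List.find?_cons_of_neg (by rw [p1]; simpa using h2)
              cases hF : List.find? (predU termino) rest <;>
                cases exacto <;> cases parcial <;> simp [hF, fE, fP, h1, h2]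
          · have fE : List.find? (predE tu) (p :: rest) = List.find? (predE tu) rest :=
              List.find?_cons_of_neg (by rw [e1]; simpa using h1)
            by_cases h2 : PySem.Str.isIn tu (PySem.Str.upper (PySem.Str.strip s)) = true
            · have fP : List.find? (predP tu) (p :: rest) = some p :=
                List.find?_cons_of_pos (by rw [p1]; exact h2)
              have h2c : PySem.Chars.isIn tu.toList (PySem.Chars.upper (PySem.Chars.strip s.toList)) = true := by
                simpa using h2
              cases hF : List.find? (predU termino) rest <;>
                cases exacto <;> cases parcial <;> simp [hF, fE, fP, h1, h2c]
            · have fP : List.find? (predP tu) (p :: rest) = List.find? (predP tu) rest :=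
                List.find?_cons_of_neg (by rw [p1]; simpa using h2)
              have h2c : PySem.Chars.isIn tu.toList (PySem.Chars.upper (PySem.Chars.strip s.toList)) = false := by
                simpa using h2
              cases hF : List.find? (predU termino) rest <;>
                cases exacto <;> cases parcial <;> simp [hF, fE, fP, h1, h2c]

-- ===== VERDICT (by name: the statement is the Claim_ definition above) =====
theorem buscar_producto_por_upc_spec : Claim_equal_buscar_producto_por_upc := by
  intro u ps _
  unfold Spec_buscar_producto_por_upc
  by_cases h : ps = [] || u = ""
  · simp [buscar_producto_por_upc, buscar_producto_por_upc_alt, h]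
  · simp only [buscar_producto_por_upc, buscar_producto_por_upc_alt, h, Bool.false_eq_true,
      if_false, altLoop_eq]
    cases h1 : ps.find? (predU (PySem.Str.strip u)) with
    | some p => simp
    | none =>
      cases h2 : ps.find? (predE (PySem.Str.upper (PySem.Str.strip u))) with
      | some p => simp
      | none =>
        cases h3 : ps.find? (predP (PySem.Str.upper (PySem.Str.strip u))) <;> simp
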